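-- pv_equiv track=rewrite | github.com/guilhermecomum/data_analysis | data_analysis.py | ranking_salesman
-- ===== SOURCE A (Python) =====
-- def ranking_salesman(sales, salesmans):
--     """
--     Relates sales and salesman's and create a list, with salesmans and
--     sum of all his sales
--     """
--     ranking = {}
--     for seller in salesmans:
--         ranking[seller[1]] = 0
--         for sale in sales:
--             if seller[1] == sale[2]:
--                 ranking[seller[1]] += sale[1]
--
--     return sorted(ranking.items(), key=lambda x: x[1])
-- ===== SOURCE B (Python) =====
-- def ranking_salesman(sales, salesmans):
--     """
--     One aggregation pass over sales (hash totals per seller name), then an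
--     ordered dedup of salesman names and a direct comprehension, sorted by total.
--     """
--     totals = {}
--     for sale in sales:
--         totals[sale[2]] = totals.get(sale[2], 0) + sale[1]
--     names = list(dict.fromkeys(s[1] for s in salesmans))
--     return sorted(((n, totals.get(n, 0)) for n in names), key=lambda x: x[1])
-- ===== Notes on version B (the rewrite author's own statement) =====
-- stated objective: faster
-- what changed: B replaces A's nested scan (for each salesman, rescan all sales into a dict) with one hash-aggregation pass over sales plus an ordered dedup of salesman names and a direct comprehension over them.
import Mathlib
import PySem

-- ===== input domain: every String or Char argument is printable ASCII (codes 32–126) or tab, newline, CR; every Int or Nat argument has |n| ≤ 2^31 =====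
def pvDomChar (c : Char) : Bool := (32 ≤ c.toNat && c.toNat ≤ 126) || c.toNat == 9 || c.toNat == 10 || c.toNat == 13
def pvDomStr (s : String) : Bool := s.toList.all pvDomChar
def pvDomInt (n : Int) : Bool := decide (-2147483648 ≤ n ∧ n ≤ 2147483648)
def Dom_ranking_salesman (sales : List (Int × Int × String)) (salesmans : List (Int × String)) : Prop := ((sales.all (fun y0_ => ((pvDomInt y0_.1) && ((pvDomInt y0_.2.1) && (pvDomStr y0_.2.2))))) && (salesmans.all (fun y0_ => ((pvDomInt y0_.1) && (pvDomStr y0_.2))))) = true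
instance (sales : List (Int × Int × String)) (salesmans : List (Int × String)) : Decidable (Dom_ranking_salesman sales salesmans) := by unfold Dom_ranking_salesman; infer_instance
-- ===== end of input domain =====

-- B aggregates sales into a hash once, dedups the salesman names in order and maps a lookup over them (O(S+N)); A rescans all sales per salesman into a dict (O(S*N)).

-- ===== PORT A =====
def ranking_salesman (sales : List (Int × Int × String)) (salesmans : List (Int × String)) : List (String × Int) :=
  let ranking : PySem.Dict String Int :=
    salesmans.foldl (fun r seller =>
      sales.foldl (fun r sale =>
        if seller.2 == sale.2.2 then r.insert seller.2 (r.getD seller.2 0 + sale.2.1) else r)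
        (r.insert seller.2 0)) PySem.Dict.empty
  PySem.List.sorted ranking.items (fun x => x.2) false

-- ===== PORT B =====
def ranking_salesman_alt (sales : List (Int × Int × String)) (salesmans : List (Int × String)) : List (String × Int) :=
  let totals : PySem.Dict String Int :=
    sales.foldl (fun d sale => d.insert sale.2.2 (d.getD sale.2.2 0 + sale.2.1)) PySem.Dict.empty
  let names : List String := PySem.List.dedup (salesmans.map (fun s => s.2))
  PySem.List.sorted (names.map (fun n => (n, totals.getD n 0))) (fun x => x.2) false

-- ===== PRECONDITION & SPEC =====
def Spec_ranking_salesman (sales : List (Int × Int × String)) (salesmans : List (Int × String)) (out : List (String × Int)) : Prop := out = ranking_salesman_alt sales salesmans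
instance (sales : List (Int × Int × String)) (salesmans : List (Int × String)) (out : List (String × Int)) : Decidable (Spec_ranking_salesman sales salesmans out) := by unfold Spec_ranking_salesman; infer_instance

-- ===== CLAIM (what is proved, stated in full; the proofs are below) =====
def Claim_equal_ranking_salesman : Prop := ∀ (sales : List (Int × Int × String)) (salesmans : List (Int × String)), Dom_ranking_salesman sales salesmans → Spec_ranking_salesman sales salesmans (ranking_salesman sales salesmans)

-- ===== LEMMAS AND PROOFS =====

-- total of the sales attributed to name s (the value A accumulates and B aggregates)
def pvSsum (s : String) (sales : List (Int × Int × String)) : Int :=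
  ((sales.filter (fun sale => s == sale.2.2)).map (fun sale => sale.2.1)).sum

-- A's inner loop over sales, started right after 'ranking[name] = 0' (generalised to v), adds pvSsum
theorem pv_inner_collapse (sales : List (Int × Int × String)) (d : PySem.Dict String Int) (s : String) (v : Int) :
    sales.foldl (fun r sale => if s == sale.2.2 then r.insert s (r.getD s 0 + sale.2.1) else r) (d.insert s v)
      = d.insert s (v + pvSsum s sales) := by
  induction sales generalizing v with
  | nil => simp [pvSsum]
  | cons x t ih =>
    simp only [List.foldl_cons]
    by_cases hx : (s == x.2.2) = true
    · rw [if_pos hx, PySem.Dict.getD_insert_self, PySem.Dict.insert_insert_self, ih]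
      have : pvSsum s (x :: t) = x.2.1 + pvSsum s t := by simp [pvSsum, hx]
      rw [this]; ring_nf
    · rw [if_neg hx, ih]
      have : pvSsum s (x :: t) = pvSsum s t := by simp [pvSsum, hx]
      rw [this]

-- B's aggregation loop computes pvSsum at every name
theorem pv_totals_getD (sales : List (Int × Int × String)) (d : PySem.Dict String Int) (n : String) :
    (sales.foldl (fun d sale => d.insert sale.2.2 (d.getD sale.2.2 0 + sale.2.1)) d).getD n 0
      = d.getD n 0 + pvSsum n sales := by
  induction sales generalizing d with
  | nil => simp [pvSsum]
  | cons x t ih =>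
    simp only [List.foldl_cons]
    rw [ih, PySem.Dict.getD_insert]
    by_cases hx : n = x.2.2
    · have hb : (n == x.2.2) = true := by simpa using hx
      have : pvSsum n (x :: t) = x.2.1 + pvSsum n t := by simp [pvSsum, hb]
      rw [this, if_pos hx, hx]; ring
    · have hb : (n == x.2.2) = false := by simpa using hx
      have : pvSsum n (x :: t) = pvSsum n t := by simp [pvSsum, hb]
      rw [this, if_neg hx]

-- a keyed insert loop leaves lookups at absent keys unchanged
theorem pv_getD_foldl_absent (V : String → Int) (ms : List (Int × String)) (d : PySem.Dict String Int)
    (k : String) (hk : k ∉ ms.map (fun s => s.2)) :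
    (ms.foldl (fun r s => r.insert s.2 (V s.2)) d).getD k 0 = d.getD k 0 := by
  induction ms generalizing d with
  | nil => rfl
  | cons x t ih =>
    simp only [List.map_cons, List.mem_cons, not_or] at hk
    simp only [List.foldl_cons]
    rw [ih _ hk.2, PySem.Dict.getD_insert, if_neg hk.1]

-- a keyed insert loop writing V key stores V at every key that occurs
theorem pv_getD_foldl_present (V : String → Int) (ms : List (Int × String)) (d : PySem.Dict String Int)
    (k : String) (hk : k ∈ ms.map (fun s => s.2)) :
    (ms.foldl (fun r s => r.insert s.2 (V s.2)) d).getD k 0 = V k := by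
  induction ms generalizing d with
  | nil => simp at hk
  | cons x t ih =>
    simp only [List.foldl_cons]
    by_cases ht : k ∈ t.map (fun s => s.2)
    · exact ih _ ht
    · have hx : k = x.2 := by
        simp only [List.map_cons, List.mem_cons] at hk
        tauto
      rw [pv_getD_foldl_absent V t _ k ht, hx, PySem.Dict.getD_insert_self]

-- ===== VERDICT (by name: the statement is the Claim_ definition above) =====
theorem ranking_salesman_spec : Claim_equal_ranking_salesman := by
  intro sales salesmans _
  unfold Spec_ranking_salesman ranking_salesman ranking_salesman_alt
  -- collapse A's inner loop: it just writes pvSsum seller.2 sales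
  have hA : (fun (r : PySem.Dict String Int) (seller : Int × String) =>
      sales.foldl (fun r sale =>
        if seller.2 == sale.2.2 then r.insert seller.2 (r.getD seller.2 0 + sale.2.1) else r)
        (r.insert seller.2 0))
      = fun (r : PySem.Dict String Int) (seller : Int × String) =>
          r.insert seller.2 (pvSsum seller.2 sales) := by
    funext r seller
    rw [pv_inner_collapse, zero_add]
  simp only [hA]
  set R : PySem.Dict String Int :=
    salesmans.foldl (fun r seller => r.insert seller.2 (pvSsum seller.2 sales)) PySem.Dict.empty with hR
  congr 1
  have hnd : R.keys.Nodup := by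
    rw [hR]
    exact PySem.Dict.nodup_keys_foldl_insert_key salesmans (fun s => s.2) _ _ PySem.Dict.nodup_keys_empty
  rw [PySem.Dict.items_eq_map_keys R hnd 0]
  have hkeys : R.keys = PySem.List.dedup (salesmans.map (fun s => s.2)) := by
    rw [hR, PySem.Dict.keys_foldl_insert_key, PySem.Dict.keys_empty, PySem.List.dedup_eq_ofList]
    exact PySem.Set.update_nil_left _
  rw [hkeys]
  apply List.map_congr_left
  intro k hk
  have hkmem : k ∈ salesmans.map (fun s => s.2) := by
    rw [PySem.List.dedup_eq_ofList] at hk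
    exact (PySem.Set.mem_ofList _ _).mp hk
  rw [hR, pv_getD_foldl_present (fun n => pvSsum n sales) salesmans PySem.Dict.empty k hkmem, pv_totals_getD, PySem.Dict.getD_empty, zero_add]
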